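-- pv_equiv track=rewrite | github.com/TimHuerzeler/PythonProjects | Excercise_26_new.py | findcommondivisor
-- ===== SOURCE A (Python) =====
-- def findcommondivisor(a,b):
--     n = 0
--     if a == 1 or b ==1:
--         return True
--     for i in range(1, min(a, b) + 1):
--         if a % i == b % i == 0:
--             n += 1
--     if n>1:
--         return True
--     else:
--         return False
-- ===== SOURCE B (Python) =====
-- def findcommondivisor(a, b):
--     if a == 1 or b == 1:
--         return True
--     if min(a, b) < 2:
--         return False
--     x, y = a, b
--     while y:
--         x, y = y, x % y
--     return x > 1
-- ===== Notes on version B (the rewrite author's own statement) =====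
-- stated objective: faster
-- what changed: Replaces the linear scan of every candidate divisor in 1..min(a,b) by a Euclidean gcd loop (modular reduction), keeping A's explicit a==1/b==1 branch and its empty-range outcome for min(a,b)<2.
import Mathlib
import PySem

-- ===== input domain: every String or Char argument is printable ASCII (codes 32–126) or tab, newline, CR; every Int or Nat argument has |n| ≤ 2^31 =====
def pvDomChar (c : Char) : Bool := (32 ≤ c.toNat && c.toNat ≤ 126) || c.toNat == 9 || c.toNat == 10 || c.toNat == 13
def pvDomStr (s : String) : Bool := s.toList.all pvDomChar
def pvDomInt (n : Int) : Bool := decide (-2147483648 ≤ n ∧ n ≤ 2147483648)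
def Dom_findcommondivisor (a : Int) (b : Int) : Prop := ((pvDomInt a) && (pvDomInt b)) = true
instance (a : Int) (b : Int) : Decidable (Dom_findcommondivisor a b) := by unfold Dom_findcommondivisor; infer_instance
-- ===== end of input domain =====

-- B replaces A's scan of every i in 1..min(a,b) by a Euclidean gcd loop (asymptotically faster).

-- ===== PORT A =====
def findcommondivisor (a : Int) (b : Int) : Bool :=
  if a == 1 || b == 1 then true
  else
    let n : Int := (PySem.List.pyRange 1 (min a b + 1) 1).foldl
      (fun n i => if PySem.Int.mod a i == PySem.Int.mod b i && PySem.Int.mod b i == 0 then n + 1 else n) 0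
    if n > 1 then true else false

-- ===== PORT B =====
-- termination of the Python `while y:` loop: |x % y| < |y| for y ≠ 0 (Python mod)
theorem pyEuclid_dec (x y : Int) (h : ¬ y = 0) : (PySem.Int.mod x y).natAbs < y.natAbs := by
  rcases lt_or_gt_of_ne h with hn | hp
  · have hb := PySem.Int.mod_neg_bounds (a := x) hn
    omega
  · have h1 := PySem.Int.mod_nonneg (a := x) hp
    have h2 := PySem.Int.mod_lt (a := x) hp
    omega

-- the `while y: x, y = y, x % y` loop of Source B
def pyEuclid (x y : Int) : Int :=
  if _h : y = 0 then x else pyEuclid y (PySem.Int.mod x y)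
termination_by y.natAbs
decreasing_by exact pyEuclid_dec x y _h

def findcommondivisor_alt (a : Int) (b : Int) : Bool :=
  if a == 1 || b == 1 then true
  else if min a b < 2 then false
  else decide (pyEuclid a b > 1)

-- ===== PRECONDITION & SPEC =====
def Spec_findcommondivisor (a : Int) (b : Int) (out : Bool) : Prop := out = findcommondivisor_alt a b
instance (a : Int) (b : Int) (out : Bool) : Decidable (Spec_findcommondivisor a b out) := by unfold Spec_findcommondivisor; infer_instance

-- ===== CLAIM (what is proved, stated in full; the proofs are below) =====
def Claim_equal_findcommondivisor : Prop := ∀ (a : Int) (b : Int), Dom_findcommondivisor a b → Spec_findcommondivisor a b (findcommondivisor a b)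

-- ===== LEMMAS AND PROOFS =====

theorem pyEuclid_eq_gcd (x y : Int) (hx : 0 ≤ x) (hy : 0 ≤ y) :
    pyEuclid x y = (Int.gcd x y : Int) := by
  rw [pyEuclid]
  split
  · next h => subst h; simp [Int.natAbs_of_nonneg hx]
  · next h =>
    have hy' : 0 < y := lt_of_le_of_ne hy (Ne.symm h)
    rw [PySem.Int.mod_eq_emod_of_pos hy']
    have hrec := pyEuclid_eq_gcd y (x % y) hy (Int.emod_nonneg x h)
    rw [hrec]
    obtain ⟨m, rfl⟩ := Int.eq_ofNat_of_zero_le hx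
    obtain ⟨k, rfl⟩ := Int.eq_ofNat_of_zero_le hy
    have hmk : ((m : Int) % (k : Int)) = ((m % k : Nat) : Int) := by push_cast; ring
    rw [hmk, Int.gcd_natCast_natCast, Int.gcd_natCast_natCast,
        Nat.gcd_comm k ((m : Nat) % k), ← Nat.gcd_rec k m, Nat.gcd_comm k m]
termination_by y.natAbs
decreasing_by
  have h1 := Int.emod_nonneg x (by omega : y ≠ 0)
  have h2 := Int.emod_lt_of_pos x hy'
  omega

theorem foldl_count (p : Int → Bool) (l : List Int) (c : Int) :
    l.foldl (fun n i => if p i then n + 1 else n) c = c + (l.countP p : Int) := by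
  induction l generalizing c with
  | nil => simp
  | cons x t ih =>
    by_cases h : p x <;> simp [h, ih] <;> ring

theorem nodup_all_one_len_le (l : List Int) (hnd : l.Nodup) (h1 : ∀ x ∈ l, x = 1) :
    l.length ≤ 1 := by
  match l with
  | [] => simp
  | [x] => simp
  | x :: y :: t =>
    exfalso
    have hx := h1 x (by simp)
    have hy := h1 y (by simp)
    subst hx
    simp [hy] at hnd

theorem len_ge_two (l : List Int) (g : Int) (h1 : (1:Int) ∈ l) (hg : g ∈ l) (hne : g ≠ 1) :
    2 ≤ l.length := by
  have hge : g ∈ l.erase 1 := (List.mem_erase_of_ne hne).mpr hg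
  have hle := List.length_erase_of_mem h1
  have := List.length_pos_of_mem hge
  omega


theorem pred_iff_dvd (a b i : Int) :
    (PySem.Int.mod a i == PySem.Int.mod b i && PySem.Int.mod b i == 0) = true ↔ (i ∣ a ∧ i ∣ b) := by
  simp only [Bool.and_eq_true, beq_iff_eq]
  constructor
  · rintro ⟨h1, h2⟩
    rw [h2] at h1
    exact ⟨(PySem.Int.mod_eq_zero_iff_dvd a i).mp h1, (PySem.Int.mod_eq_zero_iff_dvd b i).mp h2⟩
  · rintro ⟨h1, h2⟩
    rw [(PySem.Int.mod_eq_zero_iff_dvd a i).mpr h1, (PySem.Int.mod_eq_zero_iff_dvd b i).mpr h2]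
    exact ⟨rfl, rfl⟩

theorem count_iff_gcd (a b : Int) (ha : 2 ≤ a) (hb : 2 ≤ b) :
    1 < ((PySem.List.pyRange 1 (min a b + 1) 1).countP
          (fun i => PySem.Int.mod a i == PySem.Int.mod b i && PySem.Int.mod b i == 0) : Int)
      ↔ 1 < Int.gcd a b := by
  set p : Int → Bool := fun i => PySem.Int.mod a i == PySem.Int.mod b i && PySem.Int.mod b i == 0 with hp
  set R := PySem.List.pyRange 1 (min a b + 1) 1 with hR
  rw [List.countP_eq_length_filter]
  constructor
  · intro hcnt
    by_contra hg
    have hne : ¬(a = 0 ∧ b = 0) := by rintro ⟨rfl, _⟩; omega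
    have hg0 : Int.gcd a b ≠ 0 := fun h => hne ((Int.gcd_eq_zero_iff).mp h)
    have hg1 : Int.gcd a b = 1 := by omega
    have hall : ∀ x ∈ R.filter p, x = 1 := by
      intro x hx
      obtain ⟨hxR, hxp⟩ := List.mem_filter.mp hx
      obtain ⟨hda, hdb⟩ := (pred_iff_dvd a b x).mp hxp
      have hdg : x.natAbs ∣ Int.gcd a b := Int.dvd_gcd (Int.natAbs_dvd.mpr hda) (Int.natAbs_dvd.mpr hdb)
      rw [hg1] at hdg
      have hx1 : 1 ≤ x := ((PySem.List.mem_pyRange_one).mp hxR).1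
      have := Nat.le_of_dvd one_pos hdg
      omega
    have hnd : (R.filter p).Nodup := (PySem.List.nodup_pyRange_one 1 (min a b + 1)).filter p
    have := nodup_all_one_len_le (R.filter p) hnd hall
    omega
  · intro hg
    have hga : (Int.gcd a b : Int) ∣ a := Int.gcd_dvd_left a b
    have hgb : (Int.gcd a b : Int) ∣ b := Int.gcd_dvd_right a b
    have hgle_a : (Int.gcd a b : Int) ≤ a := Int.le_of_dvd (by omega) hga
    have hgle_b : (Int.gcd a b : Int) ≤ b := Int.le_of_dvd (by omega) hgb
    have hg1 : (1 : Int) < (Int.gcd a b : Int) := by exact_mod_cast hg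
    have h1mem : (1 : Int) ∈ R.filter p := by
      refine List.mem_filter.mpr ⟨(PySem.List.mem_pyRange_one).mpr ⟨le_refl 1, by omega⟩, ?_⟩
      exact (pred_iff_dvd a b 1).mpr ⟨one_dvd a, one_dvd b⟩
    have hgmem : ((Int.gcd a b : Int)) ∈ R.filter p := by
      refine List.mem_filter.mpr ⟨(PySem.List.mem_pyRange_one).mpr ⟨by omega, by omega⟩, ?_⟩
      exact (pred_iff_dvd a b _).mpr ⟨hga, hgb⟩
    have := len_ge_two (R.filter p) (Int.gcd a b : Int) h1mem hgmem (by omega)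
    omega

-- ===== VERDICT (by name: the statement is the Claim_ definition above) =====
theorem findcommondivisor_spec : Claim_equal_findcommondivisor := by
  intro a b _
  unfold Spec_findcommondivisor findcommondivisor findcommondivisor_alt
  by_cases h1 : a == 1 || b == 1
  · simp [h1]
  · have hne : ¬(a = 1 ∨ b = 1) := by simpa using h1
    rw [not_or] at hne
    rw [if_neg h1, if_neg h1]
    by_cases h2 : min a b < 2
    · have hmin : min a b ≤ 0 := by
        rcases le_total a b with h | h
        · rw [min_eq_left h] at h2 ⊢
          rcases hne with ⟨ha, _⟩
          omega
        · rw [min_eq_right h] at h2 ⊢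
          rcases hne with ⟨_, hb⟩
          omega
      rw [if_pos h2, PySem.List.pyRange_one_eq_nil (by omega)]
      simp
    · have hab : 2 ≤ a ∧ 2 ≤ b := by omega
      rw [if_neg h2, foldl_count, pyEuclid_eq_gcd a b (by omega) (by omega)]
      have hiff := count_iff_gcd a b hab.1 hab.2
      by_cases hgt : (1 : Int) < (Int.gcd a b : Int)
      · have hgt' : 1 < Int.gcd a b := by exact_mod_cast hgt
        have hc := hiff.mpr hgt'
        simp only [zero_add, gt_iff_lt]
        simp [hc, hgt]
      · have hgt' : ¬ 1 < Int.gcd a b := fun h => hgt (by exact_mod_cast h)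
        have hc : ¬ (1 : Int) < ((PySem.List.pyRange 1 (min a b + 1) 1).countP
            (fun i => PySem.Int.mod a i == PySem.Int.mod b i && PySem.Int.mod b i == 0) : Int) :=
          fun h => hgt' (hiff.mp h)
        simp only [zero_add, gt_iff_lt]
        simp [hc, hgt]
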